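-- pv_equiv track=rewrite | github.com/thekoushikdurgas/appointmentbackend | app/utils/normalization.py | normalize_list_param
-- ===== SOURCE A (Python) =====
-- from typing import Any, Iterable, Optional
--
-- def normalize_list_param(param_value: Optional[list[str]]) -> Optional[list[str]]:
--     """
--     Normalize a list query parameter by splitting comma-separated values.
--
--     FastAPI parses comma-separated query parameters like `?param=val1,val2` as
--     a single string in a list: `["val1,val2"]`. This function splits such values
--     and handles both formats:
--     - Comma-separated: `?param=val1,val2` -> `["val1", "val2"]`
--     - Multiple params: `?param=val1&param=val2` -> `["val1", "val2"]`
--     - Mixed: `?param=val1,val2&param=val3` -> `["val1", "val2", "val3"]`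
--
--     Args:
--         param_value: Optional list of strings from FastAPI Query parameter
--
--     Returns:
--         Normalized list with comma-separated values split, or None if input is None/empty
--     """
--     if not param_value:
--         return None
--
--     normalized = []
--     for item in param_value:
--         if item:
--             parts = item.split(",")
--             for part in parts:
--                 trimmed = part.strip()
--                 if trimmed:
--                     normalized.append(trimmed)
--
--     return normalized if normalized else None
-- ===== SOURCE B (Python) =====
-- from typing import Any, Iterable, Optional
--
-- def normalize_list_param(param_value: Optional[list[str]]) -> Optional[list[str]]:
--     if not param_value:
--         return None
--     combined = ",".join(s for s in param_value if s)
--     normalized = [t for t in (p.strip() for p in combined.split(",")) if t]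
--     return normalized or None
-- ===== Notes on version B (the rewrite author's own statement) =====
-- stated objective: alternative
-- what changed: B first flattens the whole input into one comma-joined string and does a single split/strip/filter pass over it, instead of A's nested per-item loops with an explicit accumulator.
import Mathlib
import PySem

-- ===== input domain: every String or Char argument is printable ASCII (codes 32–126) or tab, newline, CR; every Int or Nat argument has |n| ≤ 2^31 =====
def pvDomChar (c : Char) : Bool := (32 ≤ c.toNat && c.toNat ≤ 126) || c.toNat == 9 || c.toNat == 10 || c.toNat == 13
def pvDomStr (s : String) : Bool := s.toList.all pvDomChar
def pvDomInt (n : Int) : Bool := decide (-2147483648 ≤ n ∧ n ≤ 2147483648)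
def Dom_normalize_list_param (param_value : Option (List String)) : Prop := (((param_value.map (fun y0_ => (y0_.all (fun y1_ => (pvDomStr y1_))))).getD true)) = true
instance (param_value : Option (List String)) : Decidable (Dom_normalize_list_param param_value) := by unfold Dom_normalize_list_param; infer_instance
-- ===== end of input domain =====

-- B flattens the input into one comma-joined string and does a single split/strip/filter pass,
-- instead of A's nested per-item loops with an explicit accumulator (alternative decomposition, same cost).


-- ===== PORT A =====
-- `item.split(",")` is ported as `Chars.splitOn item.toList [',']` — exact here, since
-- `Str.split?` with the nonempty literal separator "," is `some (Chars.splitOn …)`.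
def normalize_list_param (param_value : Option (List String)) : Option (List String) :=
  match param_value with
  | none => none
  | some l =>
    if l = [] then none                           -- `if not param_value: return None`
    else
      let normalized : List String :=
        l.foldl (fun acc item =>
          if item ≠ "" then
            let parts := PySem.Chars.splitOn item.toList [',']
            parts.foldl (fun acc part =>
              let trimmed := PySem.Chars.strip part
              if trimmed ≠ [] then acc ++ [String.ofList trimmed] else acc) acc
          else acc) []
      if normalized = [] then none else some normalized    -- `return normalized if normalized else None`

-- ===== PORT B =====
def normalize_list_param_alt (param_value : Option (List String)) : Option (List String) :=
  match param_value with
  | none => none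
  | some l =>
    if l = [] then none                           -- `if not param_value: return None`
    else
      let combined : List Char := PySem.Chars.join [','] ((l.filter (· ≠ "")).map String.toList)
      let normalized : List String :=
        (((PySem.Chars.splitOn combined [',']).map PySem.Chars.strip).filter (· ≠ [])).map String.ofList
      if normalized = [] then none else some normalized    -- `return normalized or None`

-- ===== PRECONDITION & SPEC =====
def Spec_normalize_list_param (param_value : Option (List String)) (out : Option (List String)) : Prop := out = normalize_list_param_alt param_value
instance (param_value : Option (List String)) (out : Option (List String)) : Decidable (Spec_normalize_list_param param_value out) := by unfold Spec_normalize_list_param; infer_instance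

-- ===== CLAIM (what is proved, stated in full; the proofs are below) =====
def Claim_equal_normalize_list_param : Prop := ∀ (param_value : Option (List String)), Dom_normalize_list_param param_value → Spec_normalize_list_param param_value (normalize_list_param param_value)

-- ===== LEMMAS AND PROOFS =====

def commaSplit : List Char → List (List Char)
  | [] => [[]]
  | c :: rest => if c = ',' then [] :: commaSplit rest else (commaSplit rest).modifyHead (c :: ·)

theorem commaSplit_ne_nil (l : List Char) : commaSplit l ≠ [] := by
  induction l with
  | nil => simp [commaSplit]
  | cons c rest ih =>
    simp only [commaSplit]
    split
    · simp
    · cases h : commaSplit rest with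
      | nil => exact absurd h ih
      | cons a t => simp [List.modifyHead]

theorem splitOn_go_comma (fuel : Nat) (l cur : List Char) (acc : List (List Char))
    (h : l.length ≤ fuel) :
    PySem.Chars.splitOn.go [','] fuel l cur acc
      = acc.reverse ++ (commaSplit l).modifyHead (cur.reverse ++ ·) := by
  induction fuel generalizing l cur acc with
  | zero =>
    have : l = [] := by cases l with | nil => rfl | cons a b => simp at h
    subst this
    rw [PySem.Chars.splitOn.go.eq_def]
    simp [commaSplit, List.modifyHead]
  | succ n ih =>
    rw [PySem.Chars.splitOn.go.eq_def]
    cases l with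
    | nil => simp [commaSplit, List.modifyHead]
    | cons c rest =>
      simp only [List.length_cons, Nat.add_le_add_iff_right] at h
      by_cases hc : c = ','
      · subst hc
        simp only [List.isPrefixOf_cons₂, List.isPrefixOf_nil_left, Bool.and_true,
          beq_self_eq_true, if_true, List.length_cons, List.length_nil, List.drop_succ_cons,
          List.drop_zero]
        rw [ih rest [] _ h]
        simp only [commaSplit, List.modifyHead, List.reverse_cons, List.reverse_nil,
          List.nil_append, List.append_assoc, List.cons_append]
        cases commaSplit rest <;> simp
      · have hpre : ([','].isPrefixOf (c :: rest)) = false := by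
          simp [List.isPrefixOf_cons₂]; exact fun hh => hc hh.symm
        simp only [hpre, Bool.false_eq_true, if_false]
        rw [ih rest (c :: cur) acc h]
        congr 1
        cases hcs : commaSplit rest with
        | nil => exact absurd hcs (commaSplit_ne_nil rest)
        | cons a t =>
          simp [commaSplit, hc, hcs, List.modifyHead]

theorem splitOn_comma (l : List Char) :
    PySem.Chars.splitOn l [','] = commaSplit l := by
  unfold PySem.Chars.splitOn
  rw [splitOn_go_comma (l.length + 1) l [] [] (by omega)]
  cases h : commaSplit l with
  | nil => exact absurd h (commaSplit_ne_nil l)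
  | cons a t => simp [List.modifyHead]

theorem commaSplit_append (a b : List Char) :
    commaSplit (a ++ ',' :: b) = commaSplit a ++ commaSplit b := by
  induction a with
  | nil => simp [commaSplit]
  | cons c rest ih =>
    by_cases hc : c = ','
    · subst hc; simp [commaSplit, ih]
    · simp only [List.cons_append, commaSplit, hc, if_false, ih]
      cases h : commaSplit rest with
      | nil => exact absurd h (commaSplit_ne_nil rest)
      | cons x t => simp [List.modifyHead]

theorem commaSplit_join (ys : List (List Char)) (h : ys ≠ []) :
    commaSplit (PySem.Chars.join [','] ys) = ys.flatMap commaSplit := by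
  induction ys with
  | nil => exact absurd rfl h
  | cons x t ih =>
    cases t with
    | nil => simp [PySem.Chars.join_singleton]
    | cons y r =>
      rw [PySem.Chars.join_cons_cons]
      have h2 : x ++ [','] ++ PySem.Chars.join [','] (y :: r)
           = x ++ ',' :: PySem.Chars.join [','] (y :: r) := by simp
      rw [h2, commaSplit_append, ih (by simp)]
      simp

def itemTokens (item : String) : List String :=
  (((commaSplit item.toList).map PySem.Chars.strip).filter (· ≠ [])).map String.ofList

theorem inner_fold_eq (parts : List (List Char)) (acc : List String) :
    parts.foldl (fun acc part =>
      let trimmed := PySem.Chars.strip part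
      if trimmed ≠ [] then acc ++ [String.ofList trimmed] else acc) acc
    = acc ++ (((parts.map PySem.Chars.strip).filter (· ≠ [])).map String.ofList) := by
  induction parts generalizing acc with
  | nil => simp
  | cons p t ih =>
    simp only [List.foldl_cons, List.map_cons]
    by_cases hp : PySem.Chars.strip p ≠ []
    · rw [ih]; simp [hp]
    · rw [ih]; simp at hp; simp [hp]

theorem outer_fold_eq (l : List String) (acc : List String) :
    l.foldl (fun acc item =>
      if item ≠ "" then
        let parts := PySem.Chars.splitOn item.toList [',']
        parts.foldl (fun acc part =>
          let trimmed := PySem.Chars.strip part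
          if trimmed ≠ [] then acc ++ [String.ofList trimmed] else acc) acc
      else acc) acc
    = acc ++ (l.filter (· ≠ "")).flatMap itemTokens := by
  induction l generalizing acc with
  | nil => simp
  | cons x t ih =>
    rw [List.foldl_cons]
    by_cases hx : x ≠ ""
    · have hstep : (if x ≠ "" then
            (PySem.Chars.splitOn x.toList [',']).foldl (fun acc part =>
              let trimmed := PySem.Chars.strip part
              if trimmed ≠ [] then acc ++ [String.ofList trimmed] else acc) acc
          else acc) = acc ++ itemTokens x := by
        rw [if_pos hx, splitOn_comma]
        rw [inner_fold_eq]
        rfl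
      rw [hstep, ih]
      simp [hx]
    · have hstep : (if x ≠ "" then
            (PySem.Chars.splitOn x.toList [',']).foldl (fun acc part =>
              let trimmed := PySem.Chars.strip part
              if trimmed ≠ [] then acc ++ [String.ofList trimmed] else acc) acc
          else acc) = acc := if_neg hx
      rw [hstep, ih]
      simp at hx
      simp [hx]

theorem normalized_eq (l : List String) :
    (((PySem.Chars.splitOn (PySem.Chars.join [','] ((l.filter (· ≠ "")).map String.toList)) [',']).map
        PySem.Chars.strip).filter (· ≠ [])).map String.ofList
    = (l.filter (· ≠ "")).flatMap itemTokens := by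
  rw [splitOn_comma]
  cases hf : l.filter (· ≠ "") with
  | nil => simp [PySem.Chars.join_nil, commaSplit, PySem.Chars.strip, PySem.Chars.lstrip, PySem.Chars.rstrip]
  | cons x t =>
    rw [commaSplit_join _ (by simp)]
    simp only [List.flatMap_map, List.map_flatMap, List.filter_flatMap]
    rfl

-- ===== VERDICT (by name: the statement is the Claim_ definition above) =====
theorem normalize_list_param_spec : Claim_equal_normalize_list_param := by
  intro pv _
  unfold Spec_normalize_list_param normalize_list_param normalize_list_param_alt
  cases pv with
  | none => rfl
  | some l =>
    by_cases hl : l = []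
    · simp [hl]
    · simp only [hl, if_false]
      rw [outer_fold_eq l [], normalized_eq l]
      simp
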